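-- pv_equiv track=rewrite | github.com/leesunyong/BaekJoon | 1~10000/1920/solution.py | search
-- ===== SOURCE A (Python) =====
-- def search(A, numbers):
--     result = {}
--     pivot = numbers[0]
--     numberSmall, numberBig = [], []
--     ASmall, ABig = [], []
--
--     for n in numbers[1:]:
--         if n > pivot: numberBig.append(n)
--         elif n < pivot: numberSmall.append(n)
--
--     result[pivot] = '0'
--     for a in A:
--         if a > pivot: ABig.append(a)
--         elif a < pivot: ASmall.append(a)
--         else : result[pivot] = '1'
--
--
--     if not len(ABig) :
--         for n in numberBig: result[n] = '0'
--     elif len(numberBig):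
--         result.update(search(ABig, numberBig))
--
--     if not len(ASmall) :
--         for n in numberSmall: result[n] = '0'
--     elif len(numberSmall):
--         result.update(search(ASmall, numberSmall))
--
--     return result
-- ===== SOURCE B (Python) =====
-- # Iterative re-implementation: explicit LIFO stack of (numbers-chunk, open interval, A-hits-interval flag);
-- # A itself is never partitioned -- presence comes from one prebuilt set, interval occupancy from a bounded scan.
-- def _within(a, lo, hi):
--     return (lo is None or lo < a) and (hi is None or a < hi)
--
-- def search(A, numbers):
--     present = set(A)
--     result = {}
--     stack = [(numbers, None, None, True)]
--     while stack:
--         nums, lo, hi, live = stack.pop()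
--         if not live:
--             # no element of A lies in (lo, hi): every query here is absent
--             for n in nums:
--                 result[n] = '0'
--             continue
--         pivot = nums[0]
--         result[pivot] = '1' if pivot in present else '0'
--         big = [n for n in nums[1:] if n > pivot]
--         small = [n for n in nums[1:] if n < pivot]
--         # push the small side first so the big side (pushed last) is finished first
--         for side, b_lo, b_hi in ((small, lo, pivot), (big, pivot, hi)):
--             if side:
--                 stack.append((side, b_lo, b_hi, any(_within(a, b_lo, b_hi) for a in A)))
--     return result
-- ===== Notes on version B (the rewrite author's own statement) =====
-- stated objective: alternative
-- what changed: A's recursive function that double-partitions both A and the query list at each pivot is replaced by an iterative explicit-stack loop over (query-chunk, open interval) frames that never partitions A: presence of each pivot comes from one prebuilt set of A, and the 'no elements of A in this region' test is a bounded scan of A against the interval, with dead regions dumped from deferred stack frames to preserve the exact dict insertion order.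
import Mathlib
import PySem

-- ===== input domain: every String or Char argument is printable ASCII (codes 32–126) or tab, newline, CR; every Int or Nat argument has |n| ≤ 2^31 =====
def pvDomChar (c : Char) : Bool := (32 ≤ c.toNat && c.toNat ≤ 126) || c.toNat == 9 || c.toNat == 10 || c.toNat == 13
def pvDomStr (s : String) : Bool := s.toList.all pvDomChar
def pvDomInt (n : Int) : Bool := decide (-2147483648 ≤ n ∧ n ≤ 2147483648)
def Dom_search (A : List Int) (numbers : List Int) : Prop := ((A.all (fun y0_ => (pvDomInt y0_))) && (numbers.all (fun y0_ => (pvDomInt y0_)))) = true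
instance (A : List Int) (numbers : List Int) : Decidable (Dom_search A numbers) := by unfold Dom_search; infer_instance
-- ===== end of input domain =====

-- B replaces A's recursive double-partition with an explicit-stack loop over (queries, open interval) frames,
-- never partitioning A: presence comes from one prebuilt set, interval occupancy from a bounded scan (objective: alternative).

-- ===== PORT A =====
-- 'for n in numbers[1:]: if n > pivot: numberBig.append(n) elif n < pivot: numberSmall.append(n)'
def pyPartLG (pivot : Int) (xs : List Int) : List Int × List Int :=
  xs.foldl (fun p n => if pivot < n then (p.1, p.2 ++ [n]) else if n < pivot then (p.1 ++ [n], p.2) else p) ([], [])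

-- 'for a in A: …append… else: result[pivot] = "1"' (state: ((ASmall, ABig), result))
def pyPartFlag (pivot : Int) (xs : List Int) (d : PySem.Dict Int String) :
    (List Int × List Int) × PySem.Dict Int String :=
  xs.foldl (fun q a =>
      if pivot < a then ((q.1.1, q.1.2 ++ [a]), q.2)
      else if a < pivot then ((q.1.1 ++ [a], q.1.2), q.2)
      else (q.1, q.2.insert pivot "1"))
    (([], []), d)

-- termination helper for searchD (cited in decreasing_by)
theorem pyPartLG_eq_aux (pivot : Int) (xs : List Int) (a b : List Int) :
    xs.foldl (fun p n => if pivot < n then (p.1, p.2 ++ [n]) else if n < pivot then (p.1 ++ [n], p.2) else p) (a, b)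
      = (a ++ xs.filter (fun n => n < pivot), b ++ xs.filter (fun n => pivot < n)) := by
  induction xs generalizing a b with
  | nil => simp
  | cons x t ih =>
    simp only [List.foldl_cons, List.filter_cons]
    by_cases h1 : pivot < x
    · have h2 : ¬ x < pivot := by omega
      simp [h1, h2, ih]
    · by_cases h2 : x < pivot
      · simp [h1, h2, ih]
      · simp [h1, h2, ih]

theorem pyPartLG_eq (pivot : Int) (xs : List Int) :
    pyPartLG pivot xs = (xs.filter (fun n => n < pivot), xs.filter (fun n => pivot < n)) := by
  simpa using pyPartLG_eq_aux pivot xs [] []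

-- port of A's recursion (returns the dict; 'search' returns its items)
def searchD (A : List Int) (numbers : List Int) : PySem.Dict Int String :=
  match numbers with
  | [] => PySem.Dict.empty   -- Python raises IndexError at numbers[0]; excluded by Pre_search
  | pivot :: rest =>
    let nparts := pyPartLG pivot rest
    let numberSmall := nparts.1
    let numberBig := nparts.2
    let st := pyPartFlag pivot A (PySem.Dict.insert PySem.Dict.empty pivot "0")
    let ASmall := st.1.1
    let ABig := st.1.2
    let result := st.2
    let result :=
      if ABig.length = 0 then numberBig.foldl (fun r n => r.insert n "0") result
      else if numberBig.length ≠ 0 then result.update (searchD ABig numberBig).items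
      else result
    let result :=
      if ASmall.length = 0 then numberSmall.foldl (fun r n => r.insert n "0") result
      else if numberSmall.length ≠ 0 then result.update (searchD ASmall numberSmall).items
      else result
    result
termination_by numbers.length
decreasing_by
  · simp only [pyPartLG_eq]
    have := List.length_filter_le (fun n => pivot < n) rest
    simp only [List.length_cons]; omega
  · simp only [pyPartLG_eq]
    have := List.length_filter_le (fun n => n < pivot) rest
    simp only [List.length_cons]; omega

def search (A : List Int) (numbers : List Int) : List (Int × String) :=
  (searchD A numbers).items

-- ===== PORT B =====
def within (lo hi : Option Int) (a : Int) : Bool :=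
  (match lo with | none => true | some l => decide (l < a)) &&
  (match hi with | none => true | some h => decide (a < h))

-- the while-loop over the explicit stack of frames (nums, lo, hi, live)
def altLoop (A : List Int) (present : PySem.Set Int)
    (stack : List (List Int × Option Int × Option Int × Bool))
    (result : PySem.Dict Int String) : PySem.Dict Int String :=
  match stack with
  | [] => result
  | (nums, lo, hi, live) :: st =>
    if live then
      match nums with
      | [] => result   -- Python raises IndexError at nums[0] (only the empty top-level query list reaches this; excluded by Pre_search)
      | pivot :: rest =>
        let result := result.insert pivot (if present.contains pivot then "1" else "0")
        let big := rest.filter (fun n => pivot < n)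
        let small := rest.filter (fun n => n < pivot)
        let st1 := if small.isEmpty then st else
          (small, lo, some pivot, A.any (fun a => within lo (some pivot) a)) :: st
        let st2 := if big.isEmpty then st1 else
          (big, some pivot, hi, A.any (fun a => within (some pivot) hi a)) :: st1
        altLoop A present st2 result
    else
      altLoop A present st (nums.foldl (fun r n => r.insert n "0") result)
termination_by (stack.map (fun f => 3 ^ f.1.length)).sum
decreasing_by
  · have ebig : (List.filter (fun x => match x with | ⟨n, _⟩ => decide (pivot < n)) rest.attach).unattach
        = rest.filter (fun n => decide (pivot < n)) := by
      rw [List.unattach_filter (g := fun n => decide (pivot < n)) (hf := fun x h => rfl), List.unattach_attach]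
    have esmall : (List.filter (fun x => match x with | ⟨n, _⟩ => decide (n < pivot)) rest.attach).unattach
        = rest.filter (fun n => decide (n < pivot)) := by
      rw [List.unattach_filter (g := fun n => decide (n < pivot)) (hf := fun x h => rfl), List.unattach_attach]
    have hg' : (3:ℕ) ^ (rest.filter (fun n => decide (pivot < n))).length ≤ 3 ^ rest.length :=
      Nat.pow_le_pow_right (by norm_num) (List.length_filter_le _ _)
    have hh' : (3:ℕ) ^ (rest.filter (fun n => decide (n < pivot))).length ≤ 3 ^ rest.length :=
      Nat.pow_le_pow_right (by norm_num) (List.length_filter_le _ _)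
    have h3 : 1 ≤ (3:ℕ) ^ rest.length := Nat.one_le_pow _ _ (by norm_num)
    simp only [ebig, esmall]
    split_ifs <;> simp only [List.map_cons, List.sum_cons, List.length_cons] <;> omega
  · have : 1 ≤ 3 ^ nums.length := Nat.one_le_pow _ _ (by norm_num)
    simp only [List.map_cons, List.sum_cons]
    omega

def search_alt (A : List Int) (numbers : List Int) : List (Int × String) :=
  (altLoop A (PySem.Set.ofList A) [(numbers, none, none, true)] PySem.Dict.empty).items

-- ===== PRECONDITION & SPEC =====
-- Pre_search excludes only the empty query list, on which A (numbers[0]) raises IndexError.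
def Pre_search (A : List Int) (numbers : List Int) : Prop := numbers ≠ []
instance (A : List Int) (numbers : List Int) : Decidable (Pre_search A numbers) := by unfold Pre_search; infer_instance
def pvWitness_search : List Int × List Int := ([1, 3], [3, 2])

def Spec_search (A : List Int) (numbers : List Int) (out : List (Int × String)) : Prop := out = search_alt A numbers
instance (A : List Int) (numbers : List Int) (out : List (Int × String)) : Decidable (Spec_search A numbers out) := by unfold Spec_search; infer_instance

-- ===== CLAIM (what is proved, stated in full; the proofs are below) =====
def Claim_equal_search : Prop := ∀ (A : List Int) (numbers : List Int), Dom_search A numbers → Pre_search A numbers → Spec_search A numbers (search A numbers)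

-- ===== LEMMAS AND PROOFS =====

theorem pyPartFlag_eq_aux (pivot : Int) (xs : List Int) (a b : List Int) (d : PySem.Dict Int String) :
    xs.foldl (fun q a =>
        if pivot < a then ((q.1.1, q.1.2 ++ [a]), q.2)
        else if a < pivot then ((q.1.1 ++ [a], q.1.2), q.2)
        else (q.1, q.2.insert pivot "1")) ((a, b), d)
      = ((a ++ xs.filter (fun n => n < pivot), b ++ xs.filter (fun n => pivot < n)),
         if pivot ∈ xs then d.insert pivot "1" else d) := by
  induction xs generalizing a b d with
  | nil => simp
  | cons x t ih =>
    simp only [List.foldl_cons, List.filter_cons, List.mem_cons]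
    by_cases h1 : pivot < x
    · have h2 : ¬ x < pivot := by omega
      have h3 : ¬ pivot = x := by omega
      simp [h1, h2, h3, ih]
    · by_cases h2 : x < pivot
      · have h3 : ¬ pivot = x := by omega
        simp [h1, h2, h3, ih]
      · have h3 : pivot = x := by omega
        subst h3
        simp only [if_neg h1, ih]
        by_cases ht : pivot ∈ t <;> simp [ht, PySem.Dict.insert_insert_self]

theorem pyPartFlag_eq (pivot : Int) (xs : List Int) (d : PySem.Dict Int String) :
    pyPartFlag pivot xs d
      = ((xs.filter (fun n => n < pivot), xs.filter (fun n => pivot < n)),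
         if pivot ∈ xs then d.insert pivot "1" else d) := by
  simpa [pyPartFlag] using pyPartFlag_eq_aux pivot xs [] [] d

-- one-step characterization of A's recursion
theorem searchD_cons (A : List Int) (pivot : Int) (rest : List Int) :
    searchD A (pivot :: rest)
      = (let bigA := A.filter (fun a => pivot < a)
         let smallA := A.filter (fun a => a < pivot)
         let bigN := rest.filter (fun n => pivot < n)
         let smallN := rest.filter (fun n => n < pivot)
         let d0 : PySem.Dict Int String := PySem.Dict.mk [(pivot, if pivot ∈ A then "1" else "0")]
         let d1 := if bigA = [] then bigN.foldl (fun r n => r.insert n "0") d0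
                   else if bigN = [] then d0 else d0.update (searchD bigA bigN).items
         if smallA = [] then smallN.foldl (fun r n => r.insert n "0") d1
         else if smallN = [] then d1 else d1.update (searchD smallA smallN).items) := by
  rw [searchD]
  have hd0 : (PySem.Dict.mk [(pivot, "0")]).insert pivot "1"
      = PySem.Dict.mk [(pivot, "1")] := by
    apply PySem.Dict.ext
    simp [PySem.Dict.insert, PySem.Dict.contains]
  have hd0' : PySem.Dict.insert PySem.Dict.empty pivot "0" = PySem.Dict.mk [(pivot, "0")] := by
    apply PySem.Dict.ext
    simp [PySem.Dict.insert, PySem.Dict.empty, PySem.Dict.contains]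
  simp only [pyPartLG_eq, pyPartFlag_eq, List.length_eq_zero_iff]
  by_cases hmem : pivot ∈ A <;>
    simp only [hmem, ite_true, ite_false, hd0', hd0] <;>
    by_cases hA : List.filter (fun a => decide (pivot < a)) A = [] <;>
    by_cases hN : List.filter (fun n => decide (pivot < n)) rest = [] <;>
    by_cases hA2 : List.filter (fun a => decide (a < pivot)) A = [] <;>
    by_cases hN2 : List.filter (fun n => decide (n < pivot)) rest = [] <;>
    simp [hA, hN, hA2, hN2]

-- ---------- small facts about `within` ----------

theorem within_eq_big (lo hi : Option Int) (pivot : Int) (hp : within lo hi pivot = true) (a : Int) :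
    (decide (pivot < a) && within lo hi a) = within (some pivot) hi a := by
  rw [Bool.eq_iff_iff]
  unfold within at hp ⊢
  cases lo <;> cases hi <;> simp_all <;> omega

theorem within_eq_small (lo hi : Option Int) (pivot : Int) (hp : within lo hi pivot = true) (a : Int) :
    (decide (a < pivot) && within lo hi a) = within lo (some pivot) a := by
  rw [Bool.eq_iff_iff]
  unfold within at hp ⊢
  cases lo <;> cases hi <;> simp_all <;> omega

theorem filter_nil_iff_any (p : Int → Bool) (A : List Int) :
    A.filter p = [] ↔ A.any p = false := by
  simp [List.filter_eq_nil_iff, List.any_eq_false]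

theorem present_contains (A : List Int) (x : Int) :
    PySem.Set.contains (PySem.Set.ofList A) x = decide (x ∈ A) := by
  rw [Bool.eq_iff_iff]
  simp [PySem.Set.contains, PySem.Set.mem_ofList]

-- ---------- keys of the dicts built by A's recursion ----------

theorem keys_foldl_ins0_sub (xs : List Int) (d : PySem.Dict Int String) (p : Int × String)
    (hp : p ∈ (xs.foldl (fun r n => r.insert n "0") d).items) : p ∈ d.items ∨ p.1 ∈ xs := by
  induction xs generalizing d with
  | nil => simp_all
  | cons x t ih =>
    simp only [List.foldl_cons] at hp
    rcases ih _ hp with h | h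
    · rw [PySem.Dict.mem_items_insert] at h
      rcases h with h | h
      · right; simp [h]
      · left; exact h.1
    · right; simp [h]

theorem keys_update_sub (ps : List (Int × String)) (d : PySem.Dict Int String) (p : Int × String)
    (hp : p ∈ (d.update ps).items) : p ∈ d.items ∨ p.1 ∈ ps.map Prod.fst := by
  induction ps generalizing d with
  | nil => simp_all [PySem.Dict.update]
  | cons q t ih =>
    have hstep : d.update (q :: t) = (d.insert q.1 q.2).update t := rfl
    rw [hstep] at hp
    rcases ih _ hp with h | h
    · rw [PySem.Dict.mem_items_insert] at h
      rcases h with h | h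
      · right; simp [h]
      · left; exact h.1
    · right; simp [h]

theorem searchD_keys_mem (N : Nat) : ∀ (sub nums : List Int), nums.length ≤ N →
    ∀ p ∈ (searchD sub nums).items, p.1 ∈ nums := by
  induction N with
  | zero =>
    rintro sub (_ | ⟨pivot, rest⟩) hlen p hp
    · simp [searchD, PySem.Dict.empty] at hp
    · simp at hlen
  | succ N ih =>
    rintro sub (_ | ⟨pivot, rest⟩) hlen p hp
    · simp [searchD, PySem.Dict.empty] at hp
    · rw [searchD_cons] at hp
      simp only at hp
      generalize hFdef : (if pivot ∈ sub then ("1" : String) else "0") = F at hp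
      have hrest : rest.length ≤ N := by simpa using hlen
      have hbigN : (rest.filter (fun n => decide (pivot < n))).length ≤ N :=
        le_trans (List.length_filter_le _ _) hrest
      have hsmallN : (rest.filter (fun n => decide (n < pivot))).length ≤ N :=
        le_trans (List.length_filter_le _ _) hrest
      set D1 := (if sub.filter (fun a => decide (pivot < a)) = []
              then (rest.filter (fun n => decide (pivot < n))).foldl (fun r n => r.insert n "0")
                     (PySem.Dict.mk [(pivot, F)])
              else if rest.filter (fun n => decide (pivot < n)) = []
              then PySem.Dict.mk [(pivot, F)]
              else (PySem.Dict.mk [(pivot, F)]).update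
                     (searchD (sub.filter (fun a => decide (pivot < a)))
                       (rest.filter (fun n => decide (pivot < n)))).items) with hD1
      have hd1 : ∀ q ∈ D1.items, q.1 ∈ pivot :: rest := by
        rw [hD1]
        intro q hq
        split_ifs at hq with h1 h2
        · rcases keys_foldl_ins0_sub _ _ _ hq with h | h
          · simp at h; simp [h]
          · have := List.mem_of_mem_filter h; simp [this]
        · simp at hq; simp [hq]
        · rcases keys_update_sub _ _ _ hq with h | h
          · simp at h; simp [h]
          · simp only [List.mem_map] at h
            obtain ⟨q', hq', hq'1⟩ := h
            have hm := ih _ _ hbigN q' hq'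
            have hm2 := List.mem_of_mem_filter hm
            rw [← hq'1]; exact List.mem_cons_of_mem _ hm2
      split_ifs at hp with h1 h2
      · rcases keys_foldl_ins0_sub _ _ _ hp with h | h
        · exact hd1 p h
        · have := List.mem_of_mem_filter h; simp [this]
      · exact hd1 p hp
      · rcases keys_update_sub _ _ _ hp with h | h
        · exact hd1 p h
        · simp only [List.mem_map] at h
          obtain ⟨q', hq', hq'1⟩ := h
          have hm := ih _ _ hsmallN q' hq'
          have hm2 := List.mem_of_mem_filter hm
          rw [← hq'1]; exact List.mem_cons_of_mem _ hm2

theorem searchD_keys_nodup (sub nums : List Int) : (searchD sub nums).keys.Nodup := by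
  cases nums with
  | nil => simp [searchD, PySem.Dict.keys, PySem.Dict.empty]
  | cons pivot rest =>
    simp only [searchD_cons]
    generalize (if pivot ∈ sub then ("1" : String) else "0") = F
    have h0 : (PySem.Dict.mk [(pivot, F)]).keys.Nodup := by
      simp [PySem.Dict.keys]
    set D1 := (if sub.filter (fun a => decide (pivot < a)) = []
            then (rest.filter (fun n => decide (pivot < n))).foldl (fun r n => r.insert n "0")
                   (PySem.Dict.mk [(pivot, F)])
            else if rest.filter (fun n => decide (pivot < n)) = []
            then PySem.Dict.mk [(pivot, F)]
            else (PySem.Dict.mk [(pivot, F)]).update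
                   (searchD (sub.filter (fun a => decide (pivot < a)))
                     (rest.filter (fun n => decide (pivot < n)))).items) with hD1
    have h1 : D1.keys.Nodup := by
      rw [hD1]
      split_ifs
      · exact PySem.Dict.nodup_keys_foldl_insert _ (fun _ _ => "0") _ h0
      · exact h0
      · exact PySem.Dict.nodup_keys_update _ _ h0
    split_ifs
    · exact PySem.Dict.nodup_keys_foldl_insert _ (fun _ _ => "0") _ h1
    · exact h1
    · exact PySem.Dict.nodup_keys_update _ _ h1

-- ---------- dict insertion localizes to the tail of the item list ----------

theorem insert_append_fresh (R t : List (Int × String)) (n : Int) (v : String)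
    (h : ∀ p ∈ R, p.1 ≠ n) :
    (PySem.Dict.mk (R ++ t)).insert n v
      = PySem.Dict.mk (R ++ ((PySem.Dict.mk t).insert n v).items) := by
  have hR : R.any (fun p => p.1 == n) = false := by
    simp only [List.any_eq_false]
    intro p hp
    simpa using h p hp
  apply PySem.Dict.ext
  simp only [PySem.Dict.insert, PySem.Dict.contains, List.any_append, hR, Bool.false_or]
  by_cases hc : t.any (fun p => p.1 == n) = true
  · simp [hc, List.map_append]
    rw [List.map_congr_left (g := id) ?_, List.map_id]
    intro p hp
    simp [h p hp]
  · simp only [Bool.not_eq_true] at hc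
    simp [hc, List.append_assoc]

theorem foldl_ins0_append (xs : List Int) (R : List (Int × String)) :
    ∀ (t : List (Int × String)), (∀ p ∈ R, p.1 ∉ xs) →
    xs.foldl (fun r n => r.insert n "0") (PySem.Dict.mk (R ++ t))
      = PySem.Dict.mk (R ++ (xs.foldl (fun r n => r.insert n "0") (PySem.Dict.mk t)).items) := by
  induction xs with
  | nil => intro t _; simp
  | cons x xt ih =>
    intro t h
    simp only [List.foldl_cons]
    rw [insert_append_fresh R t x "0" (fun p hp e => (h p hp) (e ▸ List.mem_cons_self ..))]
    rw [ih _ (fun p hp hmem => (h p hp) (List.mem_cons_of_mem _ hmem))]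

theorem update_append_fresh (d : PySem.Dict Int String) (ps : List (Int × String))
    (h1 : ∀ p ∈ ps, d.contains p.1 = false) (h2 : (ps.map Prod.fst).Nodup) :
    d.update ps = PySem.Dict.mk (d.items ++ ps) := by
  apply PySem.Dict.ext
  have := PySem.Dict.items_foldl_insert_fresh ps Prod.fst Prod.snd d h1 h2
  simpa [PySem.Dict.update] using this

-- ---------- the output of one side of a pivot step ----------

def sideOut (A : List Int) (side : List Int) (lo hi : Option Int) : List (Int × String) :=
  if side = [] then []
  else if A.filter (fun a => within lo hi a) = []
  then (side.foldl (fun r n => r.insert n "0") (PySem.Dict.mk [])).items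
  else (searchD (A.filter (fun a => within lo hi a)) side).items

theorem sideOut_keys (A side : List Int) (lo hi : Option Int) :
    ∀ p ∈ sideOut A side lo hi, p.1 ∈ side := by
  intro p hp
  unfold sideOut at hp
  split_ifs at hp with h1 h2
  · simp at hp
  · rcases keys_foldl_ins0_sub _ _ _ hp with h | h
    · simp at h
    · exact h
  · exact searchD_keys_mem side.length _ _ le_rfl p hp

-- A's two conditional branches rewrite to an append of sideOut
theorem branch_eq (A side : List Int) (lo hi : Option Int) (T : List (Int × String))
    (hT : ∀ p ∈ T, p.1 ∉ side) :
    (if A.filter (fun a => within lo hi a) = []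
     then side.foldl (fun r n => r.insert n "0") (PySem.Dict.mk T)
     else if side = [] then PySem.Dict.mk T
     else (PySem.Dict.mk T).update (searchD (A.filter (fun a => within lo hi a)) side).items)
      = PySem.Dict.mk (T ++ sideOut A side lo hi) := by
  unfold sideOut
  by_cases hside : side = []
  · subst hside; simp
  · simp only [hside, ite_false]
    split_ifs with hA
    · have := foldl_ins0_append side T [] hT
      simpa using this
    · rw [update_append_fresh]
      · intro p hp
        have hk := searchD_keys_mem side.length _ _ le_rfl p hp
        simp only [PySem.Dict.contains_mk, List.any_eq_false]
        intro q hq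
        simp only [beq_iff_eq]
        exact fun e => (hT q hq) (e ▸ hk)
      · have := searchD_keys_nodup (A.filter (fun a => within lo hi a)) side
        simpa [PySem.Dict.keys] using this

-- ---------- one side-frame of B's stack produces exactly sideOut ----------

theorem side_step (A : List Int) (N : Nat)
    (IH : ∀ (nums : List Int) (lo hi : Option Int)
        (st : List (List Int × Option Int × Option Int × Bool)) (R : List (Int × String)),
        nums.length ≤ N → nums ≠ [] →
        (∀ m ∈ nums, within lo hi m = true) →
        (∀ p ∈ R, within lo hi p.1 = false) →
        altLoop A (PySem.Set.ofList A) ((nums, lo, hi, true) :: st) (PySem.Dict.mk R)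
          = altLoop A (PySem.Set.ofList A) st
              (PySem.Dict.mk (R ++ (searchD (A.filter (fun a => within lo hi a)) nums).items)))
    (side : List Int) (lo hi : Option Int)
    (st : List (List Int × Option Int × Option Int × Bool)) (R : List (Int × String))
    (hlen : side.length ≤ N)
    (hin : ∀ m ∈ side, within lo hi m = true)
    (hfresh : ∀ p ∈ R, within lo hi p.1 = false) :
    altLoop A (PySem.Set.ofList A)
        (if side.isEmpty then st
         else (side, lo, hi, A.any (fun a => within lo hi a)) :: st) (PySem.Dict.mk R)
      = altLoop A (PySem.Set.ofList A) st (PySem.Dict.mk (R ++ sideOut A side lo hi)) := by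
  by_cases hside : side = []
  · subst hside; simp [sideOut]
  · have hne : side.isEmpty = false := by simpa [List.isEmpty_iff] using hside
    simp only [hne, Bool.false_eq_true, ite_false]
    by_cases hany : A.any (fun a => within lo hi a) = true
    · rw [hany, IH side lo hi st R hlen hside hin hfresh]
      have hfil : ¬ A.filter (fun a => within lo hi a) = [] := by
        rw [filter_nil_iff_any]; simp [hany]
      simp [sideOut, hside, hfil]
    · simp only [Bool.not_eq_true] at hany
      rw [hany]
      have hfil : A.filter (fun a => within lo hi a) = [] := (filter_nil_iff_any _ _).mpr hany
      have hstep : altLoop A (PySem.Set.ofList A) ((side, lo, hi, false) :: st) (PySem.Dict.mk R)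
          = altLoop A (PySem.Set.ofList A) st
              (side.foldl (fun r n => r.insert n "0") (PySem.Dict.mk R)) := by
        rw [altLoop.eq_def]; simp
      rw [hstep]
      have hRside : ∀ p ∈ R, p.1 ∉ side := by
        intro p hp hmem
        have hw := hin p.1 hmem
        rw [hfresh p hp] at hw
        exact Bool.false_ne_true hw
      have hfold := foldl_ins0_append side R [] hRside
      simp only [List.append_nil] at hfold
      rw [hfold]
      simp [sideOut, hside, hfil]

-- ---------- the main correspondence ----------

theorem altLoop_region (A : List Int) (N : Nat) :
    ∀ (nums : List Int) (lo hi : Option Int)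
      (st : List (List Int × Option Int × Option Int × Bool)) (R : List (Int × String)),
      nums.length ≤ N → nums ≠ [] →
      (∀ m ∈ nums, within lo hi m = true) →
      (∀ p ∈ R, within lo hi p.1 = false) →
      altLoop A (PySem.Set.ofList A) ((nums, lo, hi, true) :: st) (PySem.Dict.mk R)
        = altLoop A (PySem.Set.ofList A) st
            (PySem.Dict.mk (R ++ (searchD (A.filter (fun a => within lo hi a)) nums).items)) := by
  induction N with
  | zero =>
    rintro (_ | ⟨pivot, rest⟩) lo hi st R hlen hne hin hfresh
    · exact absurd rfl hne
    · simp at hlen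
  | succ N ih =>
    rintro (_ | ⟨pivot, rest⟩) lo hi st R hlen hne hin hfresh
    · exact absurd rfl hne
    · have hpiv : within lo hi pivot = true := hin pivot (List.mem_cons_self ..)
      have hrest : rest.length ≤ N := by simpa using hlen
      have hflag : (if PySem.Set.contains (PySem.Set.ofList A) pivot then ("1" : String) else "0")
          = (if pivot ∈ A then ("1" : String) else "0") := by
        rw [present_contains]; simp
      have hinsert : (PySem.Dict.mk R).insert pivot (if pivot ∈ A then ("1" : String) else "0")
          = PySem.Dict.mk (R ++ [(pivot, if pivot ∈ A then ("1" : String) else "0")]) := by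
        have hfr : ∀ p ∈ R, p.1 ≠ pivot := by
          intro p hp e
          have := hfresh p hp
          rw [e, hpiv] at this
          exact Bool.true_eq_false ▸ (by simp at this)
        simpa using insert_append_fresh R [] pivot _ hfr
      have step1 : altLoop A (PySem.Set.ofList A) ((pivot :: rest, lo, hi, true) :: st) (PySem.Dict.mk R)
          = altLoop A (PySem.Set.ofList A)
              (if (rest.filter (fun n => decide (pivot < n))).isEmpty
               then (if (rest.filter (fun n => decide (n < pivot))).isEmpty then st
                     else (rest.filter (fun n => decide (n < pivot)), lo, some pivot,
                           A.any (fun a => within lo (some pivot) a)) :: st)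
               else (rest.filter (fun n => decide (pivot < n)), some pivot, hi,
                     A.any (fun a => within (some pivot) hi a)) ::
                    (if (rest.filter (fun n => decide (n < pivot))).isEmpty then st
                     else (rest.filter (fun n => decide (n < pivot)), lo, some pivot,
                           A.any (fun a => within lo (some pivot) a)) :: st))
              (PySem.Dict.mk (R ++ [(pivot, if pivot ∈ A then ("1" : String) else "0")])) := by
        rw [altLoop.eq_def]
        simp only [hflag, hinsert, ite_true]
      rw [step1]
      -- big side
      have hinBig : ∀ m ∈ rest.filter (fun n => decide (pivot < n)),
          within (some pivot) hi m = true := by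
        intro m hm
        rcases List.mem_filter.mp hm with ⟨hm1, hm2⟩
        rw [← within_eq_big lo hi pivot hpiv m]
        simp only [hm2, Bool.true_and]
        exact hin m (List.mem_cons_of_mem _ hm1)
      have hfreshBig : ∀ p ∈ R ++ [(pivot, if pivot ∈ A then ("1" : String) else "0")],
          within (some pivot) hi p.1 = false := by
        intro p hp
        rw [← within_eq_big lo hi pivot hpiv p.1]
        rcases List.mem_append.mp hp with h | h
        · simp [hfresh p h]
        · simp only [List.mem_singleton] at h
          subst h
          simp
      rw [side_step A N ih _ (some pivot) hi _ _
            (le_trans (List.length_filter_le _ _) hrest) hinBig hfreshBig]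
      -- small side
      have hinSmall : ∀ m ∈ rest.filter (fun n => decide (n < pivot)),
          within lo (some pivot) m = true := by
        intro m hm
        rcases List.mem_filter.mp hm with ⟨hm1, hm2⟩
        rw [← within_eq_small lo hi pivot hpiv m]
        simp only [hm2, Bool.true_and]
        exact hin m (List.mem_cons_of_mem _ hm1)
      have hfreshSmall : ∀ p ∈ (R ++ [(pivot, if pivot ∈ A then ("1" : String) else "0")])
            ++ sideOut A (rest.filter (fun n => decide (pivot < n))) (some pivot) hi,
          within lo (some pivot) p.1 = false := by
        intro p hp
        rw [← within_eq_small lo hi pivot hpiv p.1]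
        rcases List.mem_append.mp hp with h | h
        · rcases List.mem_append.mp h with h' | h'
          · simp [hfresh p h']
          · simp only [List.mem_singleton] at h'
            subst h'
            simp
        · have hk := sideOut_keys _ _ _ _ p h
          have hgt : pivot < p.1 := by simpa using (List.mem_filter.mp hk).2
          have hd : decide (p.1 < pivot) = false := by simp; omega
          simp [hd]
      rw [side_step A N ih _ lo (some pivot) _ _
            (le_trans (List.length_filter_le _ _) hrest) hinSmall hfreshSmall]
      -- now both sides are a single altLoop over st; compare the accumulated dicts
      congr 1
      rw [searchD_cons]
      simp only
      have hflagA : (if pivot ∈ A.filter (fun a => within lo hi a) then ("1" : String) else "0")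
          = (if pivot ∈ A then ("1" : String) else "0") := by
        simp [List.mem_filter, hpiv]
      have hffb : (A.filter (fun a => within lo hi a)).filter (fun a => decide (pivot < a))
          = A.filter (fun a => within (some pivot) hi a) := by
        rw [List.filter_filter]
        exact List.filter_congr (fun a _ => within_eq_big lo hi pivot hpiv a)
      have hffs : (A.filter (fun a => within lo hi a)).filter (fun a => decide (a < pivot))
          = A.filter (fun a => within lo (some pivot) a) := by
        rw [List.filter_filter]
        exact List.filter_congr (fun a _ => within_eq_small lo hi pivot hpiv a)
      rw [hflagA, hffb, hffs]
      have hTb : ∀ p ∈ [(pivot, if pivot ∈ A then ("1" : String) else "0")],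
          p.1 ∉ rest.filter (fun n => decide (pivot < n)) := by
        intro p hp hmem
        simp only [List.mem_singleton] at hp
        subst hp
        have h2 := (List.mem_filter.mp hmem).2
        simp at h2
      rw [branch_eq A _ (some pivot) hi _ hTb]
      have hTs : ∀ p ∈ [(pivot, if pivot ∈ A then ("1" : String) else "0")]
            ++ sideOut A (rest.filter (fun n => decide (pivot < n))) (some pivot) hi,
          p.1 ∉ rest.filter (fun n => decide (n < pivot)) := by
        intro p hp hmem
        have hlt : p.1 < pivot := by simpa using (List.mem_filter.mp hmem).2
        rcases List.mem_append.mp hp with h | h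
        · simp only [List.mem_singleton] at h
          subst h
          simp at hlt
        · have hk := sideOut_keys _ _ _ _ p h
          have hgt : pivot < p.1 := by simpa using (List.mem_filter.mp hk).2
          omega
      rw [branch_eq A _ lo (some pivot) _ hTs]
      simp [List.append_assoc]

theorem filter_within_none (A : List Int) : A.filter (fun a => within none none a) = A := by
  simp [within]

theorem search_spec : Claim_equal_search := by
  unfold Claim_equal_search
  intro A numbers _hdom hpre
  unfold Spec_search Pre_search at *
  unfold search search_alt
  have h := altLoop_region A numbers.length numbers none none [] []
    le_rfl hpre (fun m _ => rfl) (by simp)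
  have hempty : (PySem.Dict.empty : PySem.Dict Int String) = PySem.Dict.mk [] := rfl
  rw [hempty, h, filter_within_none]
  rw [altLoop]
  simp
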